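-- pv_equiv track=rewrite | github.com/Alex92rus/ErrorDetectionProject | classifier/classifier_softmax.py | feed_windows_only_tokens
-- ===== SOURCE A (Python) =====
-- no_error = 'no_error'
--
-- def feed_windows_only_tokens(_data, _window_size, _error_types):
--     windows = []
--     for sentence, errors in _data:
--         tokens = sentence.split()
--         word_window_size = min(len(tokens), _window_size)
--         for i in range(0, len(tokens) - word_window_size + 1):
--             window_tuple = (tokens[i:i + word_window_size], )
--             window_range = range(i, i + word_window_size)
--             for error in errors:
--                 if error[0] in window_range or error[1] in window_range:
--                     if len(window_tuple) < 2:
--                         window_tuple = window_tuple + (error[2], )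
--                         if error[2] not in _error_types:
--                             _error_types[error[2]] = len(_error_types)
--             if len(window_tuple) == 1:
--                 window_tuple = window_tuple + (no_error, )
--             windows.append(window_tuple)
--     return windows
-- ===== SOURCE B (Python) =====
-- no_error = 'no_error'
--
-- def feed_windows_only_tokens(_data, _window_size, _error_types):
--     # Interval painting: each error stamps its label onto the (clamped) ranges of
--     # windows it overlaps, first error wins; then windows are emitted in one pass.
--     windows = []
--     for sentence, errors in _data:
--         tokens = sentence.split()
--         w = min(len(tokens), _window_size)
--         n_windows = len(tokens) - w + 1
--         best = {}
--         for e0, e1, etype in errors: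
--             for e in (e0, e1):
--                 lo = max(0, e - w + 1)
--                 hi = min(n_windows - 1, e)
--                 for i in range(lo, hi + 1):
--                     if i not in best:
--                         best[i] = etype
--         for i in range(n_windows):
--             label = best.get(i)
--             if label is None:
--                 label = no_error
--             elif label not in _error_types:
--                 _error_types[label] = len(_error_types)
--             windows.append((tokens[i:i + w], label))
--     return windows
-- ===== Notes on version B (the rewrite author's own statement) =====
-- stated objective: alternative
-- what changed: Instead of scanning the whole error list for every window, B paints each error's label once onto the clamped interval of window starts it overlaps (first error wins via insert-if-absent) and then emits all windows in a single pass with an O(1) lookup; removes the per-window scan of errors at the cost of per-window dict lookups.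
import Mathlib
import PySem

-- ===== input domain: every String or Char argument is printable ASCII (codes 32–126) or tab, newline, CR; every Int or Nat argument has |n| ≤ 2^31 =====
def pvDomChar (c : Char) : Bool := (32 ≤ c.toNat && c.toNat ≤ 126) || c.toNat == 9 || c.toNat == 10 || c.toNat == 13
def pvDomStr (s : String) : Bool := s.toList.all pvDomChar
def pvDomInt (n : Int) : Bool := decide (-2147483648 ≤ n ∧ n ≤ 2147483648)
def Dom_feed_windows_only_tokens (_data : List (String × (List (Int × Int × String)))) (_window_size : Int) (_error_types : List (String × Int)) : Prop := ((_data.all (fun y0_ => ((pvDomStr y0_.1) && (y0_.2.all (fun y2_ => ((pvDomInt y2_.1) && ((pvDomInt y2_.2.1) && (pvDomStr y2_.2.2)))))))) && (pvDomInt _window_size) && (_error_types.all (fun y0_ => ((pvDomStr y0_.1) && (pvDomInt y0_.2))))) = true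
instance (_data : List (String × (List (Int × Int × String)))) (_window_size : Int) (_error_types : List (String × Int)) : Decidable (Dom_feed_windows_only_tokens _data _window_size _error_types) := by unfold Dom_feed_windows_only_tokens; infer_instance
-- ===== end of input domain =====

-- B replaces A's per-window scan of the whole error list by painting each error's label once onto
-- the interval of window starts it overlaps, then emitting windows in one pass (alternative algorithm).
-- Both A and B mutate the _error_types dict argument in place in the same way; the equivalence
-- proved here is about the RETURN value (the mutation is threaded identically through both ports).

-- ===== PORT A =====
def pvNoError : String := "no_error"

-- Python: "if t not in _error_types: _error_types[t] = len(_error_types)" (identical lines in A and B)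
def pvAddType (d : PySem.Dict String Int) (t : String) : PySem.Dict String Int :=
  if d.contains t then d else d.insert t (d.size : Int)

-- Python "error[0] in range(i, i+w) or error[1] in range(i, i+w)"; membership of an int in a
-- step-1 range object is exactly the bound check i ≤ e ∧ e < i + w (O(1) in Python too).
def pvOv (i w : Int) (error : Int × Int × String) : Bool :=
  (decide (i ≤ error.1) && decide (error.1 < i + w)) ||
  (decide (i ≤ error.2.1) && decide (error.2.1 < i + w))

-- A's inner "for error in errors" loop; the growing tuple (slice,) / (slice, type) is modelled as
-- the slice plus an Option label (none = length-1 tuple), paired with the _error_types dict state.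
def pvErrStep (i w : Int) (acc : Option String × PySem.Dict String Int)
    (error : Int × Int × String) : Option String × PySem.Dict String Int :=
  if pvOv i w error then
    match acc.1 with
    | none => (some error.2.2, pvAddType acc.2 error.2.2)
    | some _ => acc
  else acc

-- A's body of "for i in range(0, len(tokens) - word_window_size + 1)"
def pvWinStepA (tokens : List String) (errors : List (Int × Int × String)) (w : Int)
    (st : List (List String × String) × PySem.Dict String Int) (i : Int) :
    List (List String × String) × PySem.Dict String Int :=
  let r := errors.foldl (pvErrStep i w) (none, st.2)
  (st.1 ++ [(PySem.List.slice tokens (some i) (some (i + w)), r.1.getD pvNoError)], r.2)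

-- A's body of "for sentence, errors in _data"
def pvSentA (ws : Int) (st : List (List String × String) × PySem.Dict String Int)
    (se : String × List (Int × Int × String)) :
    List (List String × String) × PySem.Dict String Int :=
  let tokens := PySem.Str.split₀ se.1
  let w := min ((tokens.length : Int)) ws
  (PySem.List.pyRange 0 ((tokens.length : Int) - w + 1) 1).foldl (pvWinStepA tokens se.2 w) st

def feed_windows_only_tokens (_data : List (String × (List (Int × Int × String)))) (_window_size : Int) (_error_types : List (String × Int)) : List (List String × String) :=
  (_data.foldl (pvSentA _window_size) ([], PySem.Dict.mk _error_types)).1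

-- ===== PORT B =====
-- B: "for i in range(lo, hi + 1): if i not in best: best[i] = etype"
def pvPaintRange (v : String) (lo hi : Int) (best : PySem.Dict Int String) :
    PySem.Dict Int String :=
  (PySem.List.pyRange lo (hi + 1) 1).foldl
    (fun b i => if b.contains i then b else b.insert i v) best

-- B: body of "for e0, e1, etype in errors" — paint the two clamped ranges, "for e in (e0, e1)"
def pvPaintErr (w nw : Int) (best : PySem.Dict Int String) (error : Int × Int × String) :
    PySem.Dict Int String :=
  [error.1, error.2.1].foldl
    (fun b e => pvPaintRange error.2.2 (max 0 (e - w + 1)) (min (nw - 1) e) b) best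

-- B: body of the emit loop "for i in range(n_windows)" ("label = best.get(i); if label is None …")
def pvEmitStep (tokens : List String) (best : PySem.Dict Int String) (w : Int)
    (st : List (List String × String) × PySem.Dict String Int) (i : Int) :
    List (List String × String) × PySem.Dict String Int :=
  match best.get? i with
  | none => (st.1 ++ [(PySem.List.slice tokens (some i) (some (i + w)), pvNoError)], st.2)
  | some label =>
      (st.1 ++ [(PySem.List.slice tokens (some i) (some (i + w)), label)], pvAddType st.2 label)

-- B: body of "for sentence, errors in _data"
def pvSentB (ws : Int) (st : List (List String × String) × PySem.Dict String Int)
    (se : String × List (Int × Int × String)) :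
    List (List String × String) × PySem.Dict String Int :=
  let tokens := PySem.Str.split₀ se.1
  let w := min ((tokens.length : Int)) ws
  let nw := (tokens.length : Int) - w + 1
  let best := se.2.foldl (pvPaintErr w nw) PySem.Dict.empty
  (PySem.List.pyRange 0 nw 1).foldl (pvEmitStep tokens best w) st

def feed_windows_only_tokens_alt (_data : List (String × (List (Int × Int × String)))) (_window_size : Int) (_error_types : List (String × Int)) : List (List String × String) :=
  (_data.foldl (pvSentB _window_size) ([], PySem.Dict.mk _error_types)).1

-- ===== PRECONDITION & SPEC =====
def Spec_feed_windows_only_tokens (_data : List (String × (List (Int × Int × String)))) (_window_size : Int) (_error_types : List (String × Int)) (out : List (List String × String)) : Prop := out = feed_windows_only_tokens_alt _data _window_size _error_types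
instance (_data : List (String × (List (Int × Int × String)))) (_window_size : Int) (_error_types : List (String × Int)) (out : List (List String × String)) : Decidable (Spec_feed_windows_only_tokens _data _window_size _error_types out) := by unfold Spec_feed_windows_only_tokens; infer_instance

-- ===== CLAIM (what is proved, stated in full; the proofs are below) =====
def Claim_equal_feed_windows_only_tokens : Prop := ∀ (_data : List (String × (List (Int × Int × String)))) (_window_size : Int) (_error_types : List (String × Int)), Dom_feed_windows_only_tokens _data _window_size _error_types → Spec_feed_windows_only_tokens _data _window_size _error_types (feed_windows_only_tokens _data _window_size _error_types)

-- ===== LEMMAS AND PROOFS =====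

-- Once A's window tuple has its label, the rest of the error scan changes nothing.
theorem pvErr_fold_some (errs : List (Int × Int × String)) (i w : Int) (v : String)
    (et : PySem.Dict String Int) : errs.foldl (pvErrStep i w) (some v, et) = (some v, et) := by
  induction errs with
  | nil => rfl
  | cons a t ih => simp only [List.foldl_cons, pvErrStep]; split <;> exact ih

-- A's inner scan returns the type of the FIRST overlapping error, inserting it into the dict.
theorem pvErr_fold_spec (errs : List (Int × Int × String)) (i w : Int)
    (et : PySem.Dict String Int) :
    errs.foldl (pvErrStep i w) (none, et) =
      match errs.find? (pvOv i w) with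
      | none => (none, et)
      | some e => (some e.2.2, pvAddType et e.2.2) := by
  induction errs generalizing et with
  | nil => rfl
  | cons a t ih =>
    by_cases h : pvOv i w a
    · rw [List.find?_cons_of_pos h]
      simp only [List.foldl_cons, pvErrStep, h, if_true]
      exact pvErr_fold_some t i w a.2.2 (pvAddType et a.2.2)
    · rw [List.find?_cons_of_neg (by simpa using h)]
      simp only [List.foldl_cons, pvErrStep, h, Bool.false_eq_true, if_false]
      exact ih et

theorem pvPaintRange_get? (n : Nat) : ∀ (lo : Int), (hi + 1 - lo).toNat = n →
    ∀ (b : PySem.Dict Int String) (v : String) (i : Int),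
    (pvPaintRange v lo hi b).get? i =
      (b.get? i).or (if lo ≤ i ∧ i ≤ hi then some v else none) := by
  induction n with
  | zero =>
    intro lo hn b v i
    have hlo : hi + 1 ≤ lo := by omega
    rw [pvPaintRange, PySem.List.pyRange_one_eq_nil hlo]
    simp only [List.foldl_nil]
    rw [if_neg (by omega)]
    cases b.get? i <;> rfl
  | succ m ih =>
    intro lo hn b v i
    have hlt : lo < hi + 1 := by omega
    rw [pvPaintRange, PySem.List.pyRange_one_cons hlt]
    simp only [List.foldl_cons]
    have step : ((if b.contains lo then b else b.insert lo v) : PySem.Dict Int String).get? i =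
        (b.get? i).or (if i = lo then some v else none) := by
      by_cases hc : b.contains lo
      · rw [if_pos hc]
        by_cases hil : i = lo
        · subst hil
          have : (b.get? i).isSome := by
            rw [← PySem.Dict.contains_eq_isSome_get?]; exact hc
          obtain ⟨x, hx⟩ := Option.isSome_iff_exists.mp this
          simp [hx]
        · simp [hil]
      · rw [if_neg hc]
        by_cases hil : i = lo
        · subst hil
          have hnone : b.get? i = none := by
            rcases h : b.get? i with _ | x
            · rfl
            · exfalso; apply hc
              rw [PySem.Dict.contains_eq_isSome_get?, h]; rfl
          rw [PySem.Dict.get?_insert_self, hnone]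
          simp
        · rw [PySem.Dict.get?_insert_of_ne _ _ hil]
          simp [hil]
    have ihh := ih (lo + 1) (by omega) (if b.contains lo then b else b.insert lo v) v i
    rw [pvPaintRange] at ihh
    rw [ihh, step, Option.or_assoc]
    congr 1
    split_ifs <;> first
      | rfl
      | (exfalso; omega)

-- Painting one error stamps its type exactly on the window starts it overlaps.
theorem pvPaintErr_get? (w nw : Int) (b : PySem.Dict Int String) (e : Int × Int × String)
    (i : Int) (h0 : 0 ≤ i) (h1 : i < nw) :
    (pvPaintErr w nw b e).get? i =
      (b.get? i).or (if pvOv i w e then some e.2.2 else none) := by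
  rw [pvPaintErr]
  simp only [List.foldl_cons, List.foldl_nil]
  rw [pvPaintRange_get? (hi := min (nw - 1) e.2.1) _ _ rfl,
      pvPaintRange_get? (hi := min (nw - 1) e.1) _ _ rfl, Option.or_assoc]
  congr 1
  have hov : (pvOv i w e = true) ↔
      ((max 0 (e.1 - w + 1) ≤ i ∧ i ≤ min (nw - 1) e.1) ∨
       (max 0 (e.2.1 - w + 1) ≤ i ∧ i ≤ min (nw - 1) e.2.1)) := by
    simp only [pvOv, Bool.or_eq_true, Bool.and_eq_true, decide_eq_true_eq]
    omega
  by_cases hc : pvOv i w e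
  · rw [if_pos hc]
    rcases hov.mp hc with hl | hr
    · rw [if_pos hl]; rfl
    · rw [if_pos hr]
      split <;> rfl
  · have := fun h => hc (hov.mpr h)
    rw [if_neg (fun h => this (Or.inl h)), if_neg (fun h => this (Or.inr h)),
        if_neg (by simpa using hc)]
    rfl

-- Painting all errors (first one wins) realises "type of the first overlapping error".
theorem pvPaintAll_get? (errs : List (Int × Int × String)) (w nw : Int)
    (b : PySem.Dict Int String) (i : Int) (h0 : 0 ≤ i) (h1 : i < nw) :
    (errs.foldl (pvPaintErr w nw) b).get? i =
      (b.get? i).or ((errs.find? (pvOv i w)).map (·.2.2)) := by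
  induction errs generalizing b with
  | nil => simp
  | cons a t ih =>
    simp only [List.foldl_cons]
    rw [ih, pvPaintErr_get? w nw b a i h0 h1, Option.or_assoc]
    by_cases h : pvOv i w a
    · rw [List.find?_cons_of_pos h, if_pos h]; rfl
    · rw [List.find?_cons_of_neg (by simpa using h), if_neg h, Option.none_or]

-- For any window start inside the range, A's window step and B's emit step coincide.
theorem pvWin_eq_emit (tokens : List String) (errs : List (Int × Int × String)) (w nw : Int)
    (st : List (List String × String) × PySem.Dict String Int) (i : Int)
    (h0 : 0 ≤ i) (h1 : i < nw) :
    pvWinStepA tokens errs w st i =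
      pvEmitStep tokens (errs.foldl (pvPaintErr w nw) PySem.Dict.empty) w st i := by
  rw [pvWinStepA, pvEmitStep, pvPaintAll_get? errs w nw _ i h0 h1, pvErr_fold_spec]
  cases h : errs.find? (pvOv i w) <;> simp [PySem.Dict.get?_empty]

-- Per sentence, A's window loop equals B's paint-then-emit pass.
theorem pvSent_eq (ws : Int) (st : List (List String × String) × PySem.Dict String Int)
    (se : String × List (Int × Int × String)) : pvSentA ws st se = pvSentB ws st se := by
  rw [pvSentA, pvSentB]
  apply PySem.List.foldl_congr_mem
  intro acc i hi
  rw [PySem.List.mem_pyRange_one] at hi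
  exact pvWin_eq_emit _ _ _ _ acc i hi.1 hi.2

-- ===== VERDICT (by name: the statement is the Claim_ definition above) =====
theorem feed_windows_only_tokens_spec : Claim_equal_feed_windows_only_tokens := by
  intro _data _window_size _error_types _hdom
  show _ = _
  rw [feed_windows_only_tokens, feed_windows_only_tokens_alt]
  exact congrArg Prod.fst
    (PySem.List.foldl_congr_mem _data _ _ _ (fun acc se _ => pvSent_eq _window_size acc se))
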